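-- pv_equiv track=rewrite | github.com/pollycoder/SRT-DarkNet | multi-tab/reconstruct/NewFineWP.py | getU0seq
-- ===== SOURCE A (Python) =====
-- def getU0seq(original_seq):
--     sum = 0
--     for i in range(0, len(original_seq)):
--         if original_seq[i] < 0:
--             original_seq[i] = 0
--         sum += original_seq[i]
--         original_seq[i] = sum
--     return original_seq
-- ===== SOURCE B (Python) =====
-- def getU0seq(original_seq):
--     # Divide-and-conquer scan: clamped prefix sums of each half, right half
--     # shifted by the left half's total; results written back in place.
--     def scan(xs):
--         if len(xs) <= 1:
--             return [max(x, 0) for x in xs]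
--         mid = len(xs) // 2
--         left = scan(xs[:mid])
--         right = scan(xs[mid:])
--         off = left[-1]
--         return left + [off + v for v in right]
--     for i, v in enumerate(scan(original_seq)):
--         original_seq[i] = v
--     return original_seq
-- ===== Notes on version B (the rewrite author's own statement) =====
-- stated objective: alternative
-- what changed: Replaces A's sequential running-sum loop with a divide-and-conquer scan: split at the midpoint, recursively compute each half's clamped prefix sums, then offset the right half by the left half's last element; the result is written back into the argument to preserve the in-place mutation.
import Mathlib
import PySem

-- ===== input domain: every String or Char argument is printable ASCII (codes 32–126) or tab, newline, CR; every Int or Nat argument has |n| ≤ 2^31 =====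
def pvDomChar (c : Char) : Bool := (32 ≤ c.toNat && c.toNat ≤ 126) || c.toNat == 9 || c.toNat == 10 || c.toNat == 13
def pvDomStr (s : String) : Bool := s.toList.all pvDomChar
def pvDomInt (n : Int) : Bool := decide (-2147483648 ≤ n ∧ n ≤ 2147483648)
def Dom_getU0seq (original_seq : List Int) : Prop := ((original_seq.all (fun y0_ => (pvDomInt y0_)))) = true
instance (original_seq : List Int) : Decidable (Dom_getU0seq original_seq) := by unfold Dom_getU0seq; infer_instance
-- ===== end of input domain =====

-- B replaces A's sequential running-sum loop by a divide-and-conquer scan (recurse on halves,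
-- offset the right half by the left half's last element); both Pythons mutate the argument in
-- place identically, so the theorems about the return value cover the observable behaviour.

-- ===== PORT A =====
-- A's loop: one pass carrying the running sum, clamping and overwriting each cell.
def getU0seqA_go (sum : Int) : List Int → List Int
  | [] => []
  | x :: xs =>
      let x' := if x < 0 then 0 else x
      let sum' := sum + x'
      sum' :: getU0seqA_go sum' xs

def getU0seq (original_seq : List Int) : List Int := getU0seqA_go 0 original_seq

-- ===== PORT B =====
-- Source B's recursive helper 'scan': xs[:mid]/xs[mid:] with mid = len//2 ≥ 0 are exactly
-- take/drop; left[-1] is PySem.List.pyGet? left (-1) (always in range: left is nonempty here).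
def getU0seqB_scan (xs : List Int) : List Int :=
  if _h : xs.length ≤ 1 then xs.map (fun x => max x 0)
  else
    let mid := xs.length / 2
    let left := getU0seqB_scan (xs.take mid)
    let right := getU0seqB_scan (xs.drop mid)
    let off := (PySem.List.pyGet? left (-1)).getD 0
    left ++ right.map (fun v => off + v)
termination_by xs.length
decreasing_by
  · simp only [List.length_take]; omega
  · simp only [List.length_drop]; omega

-- Source B then writes scan's values back element-by-element; the returned value is scan's result.
def getU0seq_alt (original_seq : List Int) : List Int := getU0seqB_scan original_seq

-- ===== PRECONDITION & SPEC =====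
def Spec_getU0seq (original_seq : List Int) (out : List Int) : Prop := out = getU0seq_alt original_seq
instance (original_seq : List Int) (out : List Int) : Decidable (Spec_getU0seq original_seq out) := by unfold Spec_getU0seq; infer_instance

-- ===== CLAIM (what is proved, stated in full; the proofs are below) =====
def Claim_equal_getU0seq : Prop := ∀ (original_seq : List Int), Dom_getU0seq original_seq → Spec_getU0seq original_seq (getU0seq original_seq)

-- ===== LEMMAS AND PROOFS =====

-- Shifting the accumulator shifts every output of A's loop.
theorem go_shift (xs : List Int) : ∀ (s : Int),
    getU0seqA_go s xs = (getU0seqA_go 0 xs).map (fun v => s + v) := by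
  induction xs with
  | nil => intro s; simp [getU0seqA_go]
  | cons x xs ih =>
      intro s
      simp only [getU0seqA_go, List.map]
      congr 1
      · omega
      · rw [ih (s + if x < 0 then 0 else x), ih (0 + if x < 0 then 0 else x)]
        simp only [List.map_map]
        apply List.map_congr_left
        intro v _
        simp only [Function.comp_apply]
        omega

-- A's loop on an appended list: run the prefix, then continue from its last output
-- (the default s is only used when the prefix is empty).
theorem go_append (xs ys : List Int) : ∀ (s : Int),
    getU0seqA_go s (xs ++ ys) =
      getU0seqA_go s xs ++ getU0seqA_go ((getU0seqA_go s xs).getLast?.getD s) ys := by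
  induction xs with
  | nil => intro s; simp [getU0seqA_go]
  | cons x xs ih =>
      intro s
      simp only [List.cons_append, getU0seqA_go]
      rw [ih (s + if x < 0 then 0 else x)]
      simp only [List.cons.injEq, true_and]
      congr 2
      cases h : getU0seqA_go (s + if x < 0 then 0 else x) xs with
      | nil => simp
      | cons a l => simp [List.getLast?_eq_some_getLast (show a :: l ≠ [] by simp)]

-- A's loop preserves nonemptiness.
theorem go_ne_nil (s : Int) (xs : List Int) (h : xs ≠ []) : getU0seqA_go s xs ≠ [] := by
  cases xs with
  | nil => exact absurd rfl h
  | cons x xs => simp [getU0seqA_go]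

-- B's divide-and-conquer scan computes exactly A's loop from accumulator 0.
theorem scan_eq_go (xs0 : List Int) : getU0seqB_scan xs0 = getU0seqA_go 0 xs0 := by
  generalize hn : xs0.length = n
  induction n using Nat.strong_induction_on generalizing xs0 with
  | _ n ih =>
    rw [getU0seqB_scan]
    split
    · rename_i h
      cases xs0 with
      | nil => simp [getU0seqA_go]
      | cons x t =>
          cases t with
          | nil =>
              simp only [List.map, getU0seqA_go]
              congr 1
              split_ifs with hx <;> omega
          | cons y t => simp at h
    · rename_i h
      have hlen : 2 ≤ xs0.length := by omega
      have hmid1 : 1 ≤ xs0.length / 2 := by omega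
      have hmidlt : xs0.length / 2 < xs0.length := by omega
      dsimp only
      rw [ih (xs0.take (xs0.length / 2)).length (by simp only [List.length_take]; omega) _ rfl,
          ih (xs0.drop (xs0.length / 2)).length (by simp only [List.length_drop]; omega) _ rfl]
      have htne : xs0.take (xs0.length / 2) ≠ [] := by
        intro hc
        have := congrArg List.length hc
        simp only [List.length_take, List.length_nil] at this
        omega
      have hne : getU0seqA_go 0 (xs0.take (xs0.length / 2)) ≠ [] := go_ne_nil _ _ htne
      rw [PySem.List.pyGet?_neg_one]
      conv_rhs => rw [(List.take_append_drop (xs0.length / 2) xs0).symm]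
      rw [go_append, go_shift _ ((getU0seqA_go 0 (xs0.take (xs0.length / 2))).getLast?.getD 0)]

-- ===== VERDICT (by name: the statement is the Claim_ definition above) =====
theorem getU0seq_spec : Claim_equal_getU0seq := by
  intro seq _
  unfold Spec_getU0seq getU0seq getU0seq_alt
  exact (scan_eq_go seq).symm
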